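-- pv_equiv track=rewrite | github.com/ShakedTadessa/Genomic-Motif-Analyzer | finalproject.py | to_parameterized
-- ===== SOURCE A (Python) =====
-- def to_parameterized(s):
--     mapping = {}
--     next_id = 0
--     out = []
--     for ch in s:
--         if ch not in mapping:
--             mapping[ch] = str(next_id)
--             next_id += 1
--         out.append(mapping[ch])
--     return "".join(out)
-- ===== SOURCE B (Python) =====
-- def to_parameterized(s):
--     # id of a character = number of distinct characters strictly before its first occurrence,
--     # computed per distinct character from a slice, never by a running counter
--     ids = {ch: str(len(set(s[:s.index(ch)]))) for ch in set(s)}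
--     return "".join(ids[ch] for ch in s)
-- ===== Notes on version B (the rewrite author's own statement) =====
-- stated objective: alternative
-- what changed: A runs one stateful loop carrying a mutable dict and a running counter that discovers ids and emits them together; B has no counter and no incremental discovery: for each distinct character it computes the id directly as len(set(s[:s.index(ch)])) - the number of distinct characters strictly before its first occurrence - and then emits by pure lookup.
import Mathlib
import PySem

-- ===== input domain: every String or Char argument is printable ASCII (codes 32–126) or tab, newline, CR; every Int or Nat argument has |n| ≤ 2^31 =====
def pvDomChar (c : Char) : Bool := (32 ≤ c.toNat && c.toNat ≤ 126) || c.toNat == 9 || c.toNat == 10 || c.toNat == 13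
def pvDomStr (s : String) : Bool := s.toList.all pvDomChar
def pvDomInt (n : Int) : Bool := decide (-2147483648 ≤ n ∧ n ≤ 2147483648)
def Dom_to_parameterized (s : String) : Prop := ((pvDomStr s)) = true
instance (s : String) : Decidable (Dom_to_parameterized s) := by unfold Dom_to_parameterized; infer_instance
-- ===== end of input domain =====

-- B drops A's counter-carrying discovery loop: each distinct character's id is computed
-- directly as the number of distinct characters strictly before its first occurrence
-- (len(set(s[:s.index(ch)]))), then the output is emitted by pure lookup.

-- ===== PORT A =====
-- the loop of A: state = (mapping, next_id, out), one step per character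
def pvGoA (m : PySem.Dict Char String) (n : Int) (out : List String) : List Char → List String
  | [] => out
  | ch :: rest =>
    if m.contains ch then
      pvGoA m n (out ++ [m.getD ch ""]) rest
    else
      pvGoA (m.insert ch (PySem.Int.toStr n)) (n + 1)
        (out ++ [(m.insert ch (PySem.Int.toStr n)).getD ch ""]) rest

def to_parameterized (s : String) : String :=
  PySem.Str.join "" (pvGoA PySem.Dict.empty 0 [] s.toList)

-- ===== PORT B =====
-- Source B: ids = {ch: str(len(set(s[:s.index(ch)]))) for ch in set(s)}; "".join(ids[ch] for ch in s).
-- s.index(ch) is ported as PySem.Str.find: ch is drawn from s, so it always occurs and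
-- str.index agrees with str.find (no ValueError possible). set(s) is PySem.Set.ofList;
-- CPython's set iteration order is unspecified, and the dict built is order-independent
-- (one entry per key), so iterating in first-occurrence order is exact.
def to_parameterized_alt (s : String) : String :=
  let ids := (PySem.Set.ofList s.toList).foldl
    (fun d ch => d.insert ch (PySem.Int.toStr
      ((PySem.Set.ofList
          (PySem.Str.slice s none (some (PySem.Str.find s (String.ofList [ch])))).toList).length : Int)))
    PySem.Dict.empty
  PySem.Str.join "" (s.toList.map (fun ch => ids.getD ch ""))

-- ===== PRECONDITION & SPEC =====
def Spec_to_parameterized (s : String) (out : String) : Prop := out = to_parameterized_alt s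
instance (s : String) (out : String) : Decidable (Spec_to_parameterized s out) := by unfold Spec_to_parameterized; infer_instance

-- ===== CLAIM =====
def Claim_equal_to_parameterized : Prop := ∀ (s : String), Dom_to_parameterized s → Spec_to_parameterized s (to_parameterized s)

-- ===== LEMMAS AND PROOFS =====

theorem pvSet_add_eq (d : List Char) (c : Char) :
    PySem.Set.add d c = if c ∈ d then d else d ++ [c] := by
  simp [PySem.Set.add]

theorem pvFoldl_add_prefix (l d : List Char) :
    ∃ e, List.foldl PySem.Set.add d l = d ++ e := by
  induction l generalizing d with
  | nil => exact ⟨[], by simp⟩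
  | cons c t ih =>
    rw [List.foldl_cons, pvSet_add_eq]
    by_cases hc : c ∈ d
    · simpa [hc] using ih d
    · obtain ⟨e, he⟩ := ih (d ++ [c])
      exact ⟨[c] ++ e, by simp [hc, he]⟩

-- A's loop emits, for each character, the string id of its position in the
-- first-occurrence order of the full input.
theorem pvGoA_spec (l : List Char) : ∀ (d : List Char) (m : PySem.Dict Char String)
    (out : List String),
    (∀ c, m.get? c = if c ∈ d then some (PySem.Int.toStr ((d.idxOf c : Nat) : Int)) else none) →
    pvGoA m ((d.length : Nat) : Int) out l =
      out ++ l.map (fun ch =>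
        PySem.Int.toStr ((((List.foldl PySem.Set.add d l).idxOf ch : Nat) : Int))) := by
  induction l with
  | nil => intro d m out _; simp [pvGoA]
  | cons ch rest ih =>
    intro d m out h
    have hcont : m.contains ch = decide (ch ∈ d) := by
      rw [PySem.Dict.contains_eq_isSome_get?, h ch]
      by_cases hc : ch ∈ d <;> simp [hc]
    by_cases hc : ch ∈ d
    · have hD : List.foldl PySem.Set.add d (ch :: rest) = List.foldl PySem.Set.add d rest := by
        rw [List.foldl_cons, pvSet_add_eq]; simp [hc]
      have htok : m.getD ch "" = PySem.Int.toStr ((d.idxOf ch : Nat) : Int) := by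
        rw [PySem.Dict.getD_eq_get?_getD, h ch]; simp [hc]
      have hidx : (List.foldl PySem.Set.add d rest).idxOf ch = d.idxOf ch := by
        obtain ⟨e, he⟩ := pvFoldl_add_prefix rest d
        rw [he, List.idxOf_append_of_mem hc]
      rw [pvGoA, if_pos (by simp [hcont, hc]), ih d m _ h, hD, List.map_cons, hidx, ← htok]
      simp
    · have hD : List.foldl PySem.Set.add d (ch :: rest) =
          List.foldl PySem.Set.add (d ++ [ch]) rest := by
        rw [List.foldl_cons, pvSet_add_eq]; simp [hc]
      have h' : ∀ c, (m.insert ch (PySem.Int.toStr ((d.length : Nat) : Int))).get? c =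
          if c ∈ d ++ [ch] then some (PySem.Int.toStr (((d ++ [ch]).idxOf c : Nat) : Int))
          else none := by
        intro c
        rw [PySem.Dict.get?_insert]
        by_cases hceq : c = ch
        · subst hceq
          have hix : List.idxOf c (d ++ [c]) = d.length := by
            rw [List.idxOf_append_of_notMem hc]
            simp [List.idxOf_cons_self]
          simp [hix]
        · rw [if_neg hceq, h c]
          by_cases hcd : c ∈ d
          · simp [hcd, List.idxOf_append_of_mem hcd]
          · simp [hcd, hceq]
      have hlen : ((d.length : Nat) : Int) + 1 = (((d ++ [ch]).length : Nat) : Int) := by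
        simp
      have hidx : (List.foldl PySem.Set.add (d ++ [ch]) rest).idxOf ch = d.length := by
        obtain ⟨e, he⟩ := pvFoldl_add_prefix rest (d ++ [ch])
        rw [he, List.append_assoc, List.idxOf_append_of_notMem hc, List.singleton_append,
          List.idxOf_cons_self]
        omega
      have htok : (m.insert ch (PySem.Int.toStr ((d.length : Nat) : Int))).getD ch "" =
          PySem.Int.toStr ((d.length : Nat) : Int) := by
        rw [PySem.Dict.getD_insert_self]
      rw [pvGoA, if_neg (by simp [hcont, hc]), htok, hlen,
        ih (d ++ [ch]) _ _ h', hD, List.map_cons, hidx]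
      simp

-- s.find([ch]) is the first index of ch, i.e. idxOf, when ch occurs in s.
theorem pvFind_singleton (l : List Char) (ch : Char) (h : ch ∈ l) :
    PySem.Chars.find l [ch] = ((l.idxOf ch : Nat) : Int) := by
  obtain ⟨pre, suf, hl⟩ := List.append_of_mem h
  have hinf : [ch] <:+: l := ⟨pre, suf, by simpa using hl.symm⟩
  have hnn : 0 ≤ PySem.Chars.find l [ch] := (PySem.Chars.find_nonneg_iff l [ch]).mpr hinf
  obtain ⟨hpre, hmin⟩ := PySem.Chars.find_spec hnn
  set j := (PySem.Chars.find l [ch]).toNat with hj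
  obtain ⟨u, hu⟩ := hpre
  have hjlt : j < l.length := by
    by_contra hge
    rw [List.drop_eq_nil_of_le (by omega)] at hu
    simp at hu
  have hgetj : l[j]'hjlt = ch := by
    have h0 : (l.drop j)[0]'(by rw [← hu]; simp) = ch := by
      simp [← hu]
    simpa using h0
  have hle : l.idxOf ch ≤ j := by
    have hmem : ch ∈ l.take (j + 1) := by
      rw [List.take_add_one]
      simp [List.getElem?_eq_getElem hjlt, hgetj]
    rw [List.mem_take_iff_idxOf_lt h] at hmem
    omega
  have hge : j ≤ l.idxOf ch := by
    by_contra hlt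
    apply hmin (l.idxOf ch) (by omega)
    have hklt : l.idxOf ch < l.length := by omega
    have hgetk : l[l.idxOf ch]'hklt = ch := List.getElem_idxOf hklt
    have hcd := List.getElem_cons_drop hklt
    rw [hgetk] at hcd
    exact ⟨l.drop (l.idxOf ch + 1), by simpa using hcd⟩
  have : j = l.idxOf ch := by omega
  omega

-- the position of ch in the first-occurrence order = number of distinct chars
-- strictly before ch's first occurrence
theorem pvIdx_eq_card_before (l : List Char) (ch : Char) (h : ch ∈ l) :
    (PySem.Set.ofList l).idxOf ch = (PySem.Set.ofList (l.take (l.idxOf ch))).length := by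
  have hk : l.idxOf ch < l.length := List.idxOf_lt_length_of_mem h
  have hget : l[l.idxOf ch]'hk = ch := List.getElem_idxOf hk
  have hcd := List.getElem_cons_drop hk
  rw [hget] at hcd
  have hsplit : l = (l.take (l.idxOf ch) ++ [ch]) ++ l.drop (l.idxOf ch + 1) := by
    conv_lhs => rw [← List.take_append_drop (l.idxOf ch) l, ← hcd]
    simp
  have hnotin : ch ∉ l.take (l.idxOf ch) := by
    rw [List.mem_take_iff_idxOf_lt h]; omega
  have hnotin' : ch ∉ PySem.Set.ofList (l.take (l.idxOf ch)) := by
    rw [PySem.Set.mem_ofList]; exact hnotin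
  conv_lhs => rw [hsplit]
  rw [PySem.Set.ofList_append, PySem.Set.update_eq_append_filter,
    PySem.Set.ofList_append_singleton, pvSet_add_eq, if_neg hnotin', List.append_assoc,
    List.idxOf_append_of_notMem hnotin', List.singleton_append, List.idxOf_cons_self]
  omega

-- the comprehension dict maps each key of ks to f of that key
theorem pvTab_get? (f : Char → String) : ∀ (ks : List Char) (m : PySem.Dict Char String)
    (c : Char),
    (ks.foldl (fun d ch => d.insert ch (f ch)) m).get? c =
      if c ∈ ks then some (f c) else m.get? c := by
  intro ks
  induction ks with
  | nil => intro m c; simp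
  | cons k t ih =>
    intro m c
    rw [List.foldl_cons, ih]
    by_cases hct : c ∈ t
    · simp [hct]
    · rw [if_neg hct, PySem.Dict.get?_insert]
      by_cases hck : c = k
      · subst hck; simp
      · simp [hck, hct]

-- ===== VERDICT =====
theorem to_parameterized_spec : Claim_equal_to_parameterized := by
  intro s _
  unfold Spec_to_parameterized to_parameterized to_parameterized_alt
  congr 1
  have hA := pvGoA_spec s.toList [] PySem.Dict.empty []
    (by intro c; simp [PySem.Dict.get?_empty])
  simp only [List.length_nil, Nat.cast_zero, List.nil_append] at hA
  rw [hA]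
  refine List.map_congr_left ?_
  intro ch hch
  have hfold : List.foldl PySem.Set.add ([] : List Char) s.toList
      = PySem.Set.ofList s.toList := (PySem.Set.ofList_eq_foldl _).symm
  have hfind : PySem.Str.find s (String.ofList [ch]) = ((s.toList.idxOf ch : Nat) : Int) := by
    rw [PySem.Str.find_eq]
    simpa using pvFind_singleton s.toList ch hch
  rw [hfold, PySem.Dict.getD_eq_get?_getD,
    pvTab_get? _ (PySem.Set.ofList s.toList) PySem.Dict.empty ch,
    if_pos ((PySem.Set.mem_ofList _ _).mpr hch)]
  rw [PySem.Str.toList_slice, PySem.Chars.slice_eq_listSlice, hfind,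
    PySem.List.slice_to_natCast, pvIdx_eq_card_before s.toList ch hch]
  rfl
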